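-- pv_equiv track=rewrite | github.com/remekozicki/ASD | do_egz_t1/kol2a/kol2a.py | zadanie
-- ===== SOURCE A (Python) =====
-- def new_tab(P):
--     n = len(P)
--     PP = []
--     for i in range(n):
--         PP.append([P[i][0],P[i][1],i])
--     PP.sort(key = lambda x: x[0])
--
--     return PP
--
-- def zadanie(P,B):
--     k = 3
--     PP = new_tab(P)
--     n = len(PP)
--     DP = [[[None for _ in range(2)]for _ in range(k)]for _ in range(n)]
--     os = 0 # 0 jacek, 1 marek
--     idx = 0
--    # return rec(PP,DP,k-1,os,idx,n)
--
--     idx = 0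
--     k = 2
--     os = 0
--     res = []
--
--     while idx < n:
--
--         if PP[idx][1]:
--             if k == 0:
--                 res.append(PP[idx][2])
--                 k = 2
--                 os = (os+1)%2
--
--             else:
--                 w1 = rec(PP,DP,k-1,os,idx+1,n)
--                 w2 =  rec(PP,DP,2,(os+1)%2,idx+1,n)
--                 if w1 > w2:
--                     res.append(PP[idx][2])
--                     k = 2
--                     os = (os+1)%2
--
--                 else:
--                     k -=1
--         idx+=1
--     return res
--
-- def rec(PP,DP,k,os,idx,n):
--
--     if idx == n:
--         return 0
--
--     if DP[idx][k][os] != None: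
--         return DP[idx][k][os]
--
--     else:
--         if PP[idx][1]:
--             if k == 0:
--                 DP[idx][k][os] = rec(PP,DP,2,(os+1)%2,idx+1,n)
--
--             else:
--                 DP[idx][k][os] = min( rec(PP,DP,k-1,os,idx+1,n), rec(PP,DP,2,(os+1)%2,idx+1,n) )
--         else:
--             DP[idx][k][os] = rec(PP,DP,k,os,idx+1,n) + os
--
--
--     return DP[idx][k][os]
-- ===== SOURCE B (Python) =====
-- def zadanie(P, B):
--     # Bottom-up DP table (rows built back-to-front) instead of memoized recursion.
--     PP = sorted(([p[0], p[1], i] for i, p in enumerate(P)), key=lambda x: x[0])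
--     rows = [[[0, 0], [0, 0], [0, 0]]]  # base row: value 0 for idx == n
--     for p in reversed(PP):
--         nxt = rows[-1]
--         if p[1]:
--             row = [[nxt[2][1], nxt[2][0]],
--                    [min(nxt[0][0], nxt[2][1]), min(nxt[0][1], nxt[2][0])],
--                    [min(nxt[1][0], nxt[2][1]), min(nxt[1][1], nxt[2][0])]]
--         else:
--             row = [[nxt[0][0], nxt[0][1] + 1],
--                    [nxt[1][0], nxt[1][1] + 1],
--                    [nxt[2][0], nxt[2][1] + 1]]
--         rows.append(row)
--     rows.reverse()
--     res = []
--     k, os = 2, 0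
--     for p, nxt in zip(PP, rows[1:]):
--         if p[1]:
--             if k == 0 or nxt[k - 1][os] > nxt[2][(os + 1) % 2]:
--                 res.append(p[2])
--                 k, os = 2, (os + 1) % 2
--             else:
--                 k -= 1
--     return res
-- ===== Notes on version B (the rewrite author's own statement) =====
-- stated objective: alternative
-- what changed: The memoized top-down recursion rec with a mutable None-filled table is replaced by an explicit bottom-up DP: rows of the table are built back-to-front from a zero base row, and the selection loop reads the precomputed next-row values via zip(PP, rows[1:]) instead of calling rec.
import Mathlib
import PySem

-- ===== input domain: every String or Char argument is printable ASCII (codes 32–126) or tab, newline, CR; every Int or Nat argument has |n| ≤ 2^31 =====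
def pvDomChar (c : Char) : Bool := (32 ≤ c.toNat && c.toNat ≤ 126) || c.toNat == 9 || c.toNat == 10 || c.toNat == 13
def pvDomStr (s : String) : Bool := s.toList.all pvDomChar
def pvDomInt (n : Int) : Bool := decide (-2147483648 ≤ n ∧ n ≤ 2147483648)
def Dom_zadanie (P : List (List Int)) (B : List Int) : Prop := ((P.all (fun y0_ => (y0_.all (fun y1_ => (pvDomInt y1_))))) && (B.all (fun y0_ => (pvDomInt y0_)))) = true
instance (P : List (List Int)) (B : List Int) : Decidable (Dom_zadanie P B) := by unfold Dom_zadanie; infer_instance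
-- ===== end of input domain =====

-- B replaces A's memoized recursion `rec` by a bottom-up DP table built back-to-front
-- (objective: alternative decomposition, same asymptotic cost; B is not claimed faster).
-- Note: `B` (the second Python parameter) is never used by either program.

-- ===== PORT A =====
-- rows of PP are the 3-element lists [P[i][0], P[i][1], i], ported as triples.
def newTab (P : List (List Int)) : List (Int × Int × Int) :=
  PySem.List.sorted
    ((PySem.List.pyRange 0 (P.length : Int) 1).foldl
      (fun acc i =>
        acc ++ [(PySem.List.pyGetD (PySem.List.pyGetD P i []) 0 0,
                 PySem.List.pyGetD (PySem.List.pyGetD P i []) 1 0, i)]) [])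
    (fun x => x.1) false

-- DP memo table: `none` = Python's None entry (DP is a fresh None-filled table per call).
def MemoA : Type := Nat → Nat → Nat → Option Int

def memoSet (m : MemoA) (i k os : Nat) (v : Int) : MemoA :=
  fun i' k' os' => if i' = i ∧ k' = k ∧ os' = os then some v else m i' k' os'

-- `rec(PP, DP, k, os, idx, n)`: fuel bounds the recursion depth (Python recurses on idx+1
-- until idx == n, so any fuel ≥ n - idx reproduces it exactly); the memo is threaded as state.
def recA (PP : List (Int × Int × Int)) (n : Nat) :
    Nat → Nat → Nat → Nat → MemoA → Int × MemoA
  | 0, _, _, _, m => (0, m)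
  | fuel + 1, k, os, idx, m =>
    if idx = n then (0, m)
    else
      match m idx k os with
      | some v => (v, m)
      | none =>
        let p := PySem.List.pyGetD PP (idx : Int) (0, 0, 0)
        if p.2.1 ≠ 0 then
          if k = 0 then
            let r := recA PP n fuel 2 ((os + 1) % 2) (idx + 1) m
            (r.1, memoSet r.2 idx k os r.1)
          else
            let r1 := recA PP n fuel (k - 1) os (idx + 1) m
            let r2 := recA PP n fuel 2 ((os + 1) % 2) (idx + 1) r1.2
            (min r1.1 r2.1, memoSet r2.2 idx k os (min r1.1 r2.1))
        else
          let r := recA PP n fuel k os (idx + 1) m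
          (r.1 + (os : Int), memoSet r.2 idx k os (r.1 + (os : Int)))

-- the `while idx < n` loop; c = n - idx counts the remaining iterations.
def loopA (PP : List (Int × Int × Int)) (n : Nat) :
    Nat → Nat → Nat → Nat → List Int → MemoA → List Int
  | 0, _, _, _, res, _ => res
  | c + 1, idx, k, os, res, m =>
    let p := PySem.List.pyGetD PP (idx : Int) (0, 0, 0)
    if p.2.1 ≠ 0 then
      if k = 0 then
        loopA PP n c (idx + 1) 2 ((os + 1) % 2) (res ++ [p.2.2]) m
      else
        let r1 := recA PP n n (k - 1) os (idx + 1) m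
        let r2 := recA PP n n 2 ((os + 1) % 2) (idx + 1) r1.2
        if r1.1 > r2.1 then
          loopA PP n c (idx + 1) 2 ((os + 1) % 2) (res ++ [p.2.2]) r2.2
        else
          loopA PP n c (idx + 1) (k - 1) os res r2.2
    else
      loopA PP n c (idx + 1) k os res m

def zadanie (P : List (List Int)) (B : List Int) : List Int :=
  loopA (newTab P) (newTab P).length (newTab P).length 0 2 0 [] (fun _ _ _ => none)

-- ===== PORT B =====
-- a DP row [[·,·],[·,·],[·,·]] (indices k = 0,1,2 and os = 0,1), ported as nested pairs.
def RowB : Type := (Int × Int) × (Int × Int) × (Int × Int)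

def baseRowB : RowB := ((0, 0), (0, 0), (0, 0))

-- the row for position idx computed from the row `nxt` for idx+1 (Source B's if/else on p[1]).
def stepRowB (p : Int × Int × Int) (nxt : RowB) : RowB :=
  if p.2.1 ≠ 0 then
    ((nxt.2.2.2, nxt.2.2.1),
     (min nxt.1.1 nxt.2.2.2, min nxt.1.2 nxt.2.2.1),
     (min nxt.2.1.1 nxt.2.2.2, min nxt.2.1.2 nxt.2.2.1))
  else
    ((nxt.1.1, nxt.1.2 + 1), (nxt.2.1.1, nxt.2.1.2 + 1), (nxt.2.2.1, nxt.2.2.2 + 1))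

-- Source B appends rows while walking reversed(PP) and then reverses: that builds, front to
-- back, exactly `stepRowB p (head of the rows built so far) :: rows built so far`.
def buildRowsB : List (Int × Int × Int) → List RowB
  | [] => [baseRowB]
  | p :: rest =>
    let rs := buildRowsB rest
    stepRowB p (rs.headD baseRowB) :: rs

-- nxt[k][os] (only k ≤ 2, os ≤ 1 are ever used)
def getKB (r : RowB) (k : Nat) : Int × Int :=
  match k with
  | 0 => r.1
  | 1 => r.2.1
  | _ => r.2.2

def getOsB (q : Int × Int) (os : Nat) : Int :=
  match os with
  | 0 => q.1
  | _ => q.2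

-- the `for p, nxt in zip(PP, rows[1:])` loop with state (k, os, res).
def loopB : List ((Int × Int × Int) × RowB) → Nat → Nat → List Int → List Int
  | [], _, _, res => res
  | (p, nxt) :: rest, k, os, res =>
    if p.2.1 ≠ 0 then
      if k = 0 ∨ getOsB (getKB nxt (k - 1)) os > getOsB (getKB nxt 2) ((os + 1) % 2) then
        loopB rest 2 ((os + 1) % 2) (res ++ [p.2.2])
      else
        loopB rest (k - 1) os res
    else
      loopB rest k os res

def ppB (P : List (List Int)) : List (Int × Int × Int) :=
  PySem.List.sorted
    ((PySem.List.enumerate P 0).map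
      (fun ip => (PySem.List.pyGetD ip.2 0 0, PySem.List.pyGetD ip.2 1 0, ip.1)))
    (fun x => x.1) false

def zadanie_alt (P : List (List Int)) (B : List Int) : List Int :=
  loopB ((ppB P).zip (buildRowsB (ppB P)).tail) 2 0 []

-- ===== PRECONDITION & SPEC =====
-- Pre_ excludes exactly the inputs on which Python A raises IndexError: a row of P with
-- fewer than 2 elements makes `P[i][0]` / `P[i][1]` raise in new_tab.
def Pre_zadanie (P : List (List Int)) (B : List Int) : Prop :=
  ∀ row ∈ P, 2 ≤ row.length
instance (P : List (List Int)) (B : List Int) : Decidable (Pre_zadanie P B) := by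
  unfold Pre_zadanie; infer_instance

def pvWitness_zadanie : List (List Int) × List Int := ([[3, 1], [1, 0], [2, 1]], [])

def Spec_zadanie (P : List (List Int)) (B : List Int) (out : List Int) : Prop := out = zadanie_alt P B
instance (P : List (List Int)) (B : List Int) (out : List Int) : Decidable (Spec_zadanie P B out) := by unfold Spec_zadanie; infer_instance

-- ===== CLAIM (what is proved, stated in full; the proofs are below) =====
def Claim_equal_zadanie : Prop := ∀ (P : List (List Int)) (B : List Int), Dom_zadanie P B → Pre_zadanie P B → Spec_zadanie P B (zadanie P B)

-- ===== LEMMAS AND PROOFS =====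

-- the pure DP value: what rec(PP,DP,k,os,idx,n) returns, as a function of the suffix PP[idx:]
def V : List (Int × Int × Int) → Nat → Nat → Int
  | [], _, _ => 0
  | p :: rest, k, os =>
    if p.2.1 ≠ 0 then
      if k = 0 then V rest 2 ((os + 1) % 2)
      else min (V rest (k - 1) os) (V rest 2 ((os + 1) % 2))
    else V rest k os + (os : Int)

-- every entry of the head row of B's table is the corresponding V value
theorem headD_buildRowsB (PP : List (Int × Int × Int)) :
    (buildRowsB PP).headD baseRowB =
      ((V PP 0 0, V PP 0 1), (V PP 1 0, V PP 1 1), (V PP 2 0, V PP 2 1)) := by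
  induction PP with
  | nil => rfl
  | cons p rest ih =>
    simp only [buildRowsB, List.headD_cons, ih, stepRowB, V]
    split <;> simp

-- a memo is valid if every stored entry equals the pure value
def ValidM (PP : List (Int × Int × Int)) (m : MemoA) : Prop :=
  ∀ i k os v, m i k os = some v → v = V (PP.drop i) k os

theorem validM_memoSet {PP : List (Int × Int × Int)} {m : MemoA} {i k os : Nat} {v : Int}
    (hm : ValidM PP m) (hv : v = V (PP.drop i) k os) : ValidM PP (memoSet m i k os v) := by
  intro i' k' os' v' h
  unfold memoSet at h
  split at h
  · rename_i hc
    obtain ⟨h1, h2, h3⟩ := hc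
    cases h; subst h1 h2 h3; exact hv
  · exact hm _ _ _ _ h

theorem recA_correct (PP : List (Int × Int × Int)) :
    ∀ fuel idx k os m, ValidM PP m → PP.length - idx ≤ fuel → idx ≤ PP.length →
      (recA PP PP.length fuel k os idx m).1 = V (PP.drop idx) k os ∧
      ValidM PP (recA PP PP.length fuel k os idx m).2 := by
  intro fuel
  induction fuel with
  | zero =>
    intro idx k os m hm hf hi
    have : idx = PP.length := by omega
    subst this
    simp [recA, List.drop_of_length_le (le_refl _), V, hm]
  | succ f ih =>
    intro idx k os m hm hf hi
    by_cases hidx : idx = PP.length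
    · subst hidx
      simp [recA, List.drop_of_length_le (le_refl _), V, hm]
    · have hlt : idx < PP.length := by omega
      have hdrop : PP.drop idx = PP[idx] :: PP.drop (idx + 1) :=
        List.drop_eq_getElem_cons hlt
      have hget : PySem.List.pyGetD PP (idx : Int) (0, 0, 0) = PP[idx] := by
        rw [PySem.List.pyGetD_natCast, List.getD_eq_getElem _ _ hlt]
      simp only [recA, if_neg hidx]
      cases hmem : m idx k os with
      | some v =>
        exact ⟨hm _ _ _ _ hmem, hm⟩
      | none =>
        simp only [hget]
        by_cases hp : PP[idx].2.1 ≠ 0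
        · by_cases hk : k = 0
          · subst hk
            simp only [if_pos hp]
            obtain ⟨h1, h2⟩ := ih (idx + 1) 2 ((os + 1) % 2) m hm (by omega) (by omega)
            refine ⟨?_, validM_memoSet h2 ?_⟩ <;>
              · rw [hdrop]
                simp only [V, if_pos hp]
                simp [h1]
          · simp only [if_pos hp, if_neg hk]
            obtain ⟨h1, h2⟩ := ih (idx + 1) (k - 1) os m hm (by omega) (by omega)
            obtain ⟨h1', h2'⟩ := ih (idx + 1) 2 ((os + 1) % 2) _ h2 (by omega) (by omega)
            refine ⟨?_, validM_memoSet h2' ?_⟩ <;>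
              · rw [hdrop]
                simp only [V, if_pos hp, if_neg hk]
                simp [h1, h1']
        · simp only [if_neg hp]
          obtain ⟨h1, h2⟩ := ih (idx + 1) k os m hm (by omega) (by omega)
          refine ⟨?_, validM_memoSet h2 ?_⟩ <;>
            · rw [hdrop]
              simp only [V, if_neg hp]
              simp [h1]

-- the zip list loopB consumes for the suffix PP.drop idx
theorem buildRowsB_ne_nil (l : List (Int × Int × Int)) : buildRowsB l ≠ [] := by
  cases l <;> simp [buildRowsB]

theorem zip_drop_step (PP : List (Int × Int × Int)) (idx : Nat) (hlt : idx < PP.length) :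
    (PP.drop idx).zip (buildRowsB (PP.drop idx)).tail =
      (PP[idx], (buildRowsB (PP.drop (idx + 1))).headD baseRowB) ::
        (PP.drop (idx + 1)).zip (buildRowsB (PP.drop (idx + 1))).tail := by
  have hdrop : PP.drop idx = PP[idx] :: PP.drop (idx + 1) := List.drop_eq_getElem_cons hlt
  obtain ⟨r, rs, hr⟩ := List.exists_cons_of_ne_nil (buildRowsB_ne_nil (PP.drop (idx + 1)))
  rw [hdrop]
  simp only [buildRowsB, List.tail_cons, hr, List.zip_cons_cons, List.headD_cons,
    List.tail_cons]

theorem loopA_eq_loopB (PP : List (Int × Int × Int)) :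
    ∀ c idx k os res m, ValidM PP m → idx + c = PP.length → k ≤ 2 → os ≤ 1 →
      loopA PP PP.length c idx k os res m =
        loopB ((PP.drop idx).zip (buildRowsB (PP.drop idx)).tail) k os res := by
  intro c
  induction c with
  | zero =>
    intro idx k os res m hm hn hk hos
    have : PP.drop idx = [] := List.drop_of_length_le (by omega)
    simp [loopA, loopB, this]
  | succ c ih =>
    intro idx k os res m hm hn hk hos
    have hlt : idx < PP.length := by omega
    have hget : PySem.List.pyGetD PP (idx : Int) (0, 0, 0) = PP[idx] := by
      rw [PySem.List.pyGetD_natCast, List.getD_eq_getElem _ _ hlt]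
    rw [zip_drop_step PP idx hlt]
    simp only [loopA, loopB, hget]
    by_cases hp : PP[idx].2.1 ≠ 0
    · simp only [if_pos hp]
      by_cases hk0 : k = 0
      · subst hk0
        simp only []
        exact ih (idx + 1) 2 ((os + 1) % 2) _ m hm (by omega) (by omega) (by omega)
      · simp only [if_neg hk0]
        obtain ⟨h1, h2⟩ := recA_correct PP PP.length (idx + 1) (k - 1) os m hm
          (by omega) (by omega)
        obtain ⟨h1', h2'⟩ := recA_correct PP PP.length (idx + 1) 2 ((os + 1) % 2) _ h2
          (by omega) (by omega)
        have hsel1 : getOsB (getKB ((buildRowsB (PP.drop (idx + 1))).headD baseRowB) (k - 1)) os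
            = V (PP.drop (idx + 1)) (k - 1) os := by
          rw [headD_buildRowsB]
          interval_cases k <;> interval_cases os <;> rfl
        have hsel2 : getOsB (getKB ((buildRowsB (PP.drop (idx + 1))).headD baseRowB) 2) ((os + 1) % 2)
            = V (PP.drop (idx + 1)) 2 ((os + 1) % 2) := by
          rw [headD_buildRowsB]
          interval_cases os <;> rfl
        by_cases hgt : V (PP.drop (idx + 1)) (k - 1) os > V (PP.drop (idx + 1)) 2 ((os + 1) % 2)
        · rw [if_pos (by rw [h1, h1']; exact hgt),
              if_pos (by rw [hsel1, hsel2]; exact Or.inr hgt)]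
          exact ih (idx + 1) 2 ((os + 1) % 2) _ _ h2' (by omega) (by omega) (by omega)
        · rw [if_neg (by rw [h1, h1']; exact hgt),
              if_neg (by rw [hsel1, hsel2]; exact fun h => h.elim hk0 hgt)]
          exact ih (idx + 1) (k - 1) os _ _ h2' (by omega) (by omega) (by omega)
    · simp only [if_neg hp]
      exact ih (idx + 1) k os _ m hm (by omega) (by omega) (by omega)

-- the two PP constructions (index loop + double pyGetD vs. map over enumerate) agree
-- when every row of P has length ≥ 2 (in fact always, since pyGetD defaults agree)
theorem enum_eq : ∀ (Q : List (List Int)) (s : Nat), PySem.List.enumerate Q (s : Int) =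
    (List.range Q.length).map (fun (i : Nat) => (((s + i : Nat) : Int), Q.getD i [])) := by
  intro Q
  induction Q with
  | nil => intro s; simp [PySem.List.enumerate]
  | cons q qs ih =>
    intro s
    have h1 : PySem.List.enumerate (q :: qs) (s : Int) =
        ((s : Int), q) :: PySem.List.enumerate qs ((s : Int) + 1) := by
      simp [PySem.List.enumerate]
    have h2 : ((s : Int) + 1) = (((s + 1 : Nat)) : Int) := by push_cast; ring
    rw [h1, h2, ih (s + 1), List.length_cons, List.range_succ_eq_map, List.map_cons,
      List.map_map]
    simp [Function.comp, Nat.add_comm, Nat.add_left_comm]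

-- the two PP constructions (index loop + double pyGetD vs. map over enumerate) agree
theorem newTab_eq (P : List (List Int)) : newTab P = ppB P := by
  unfold newTab ppB
  congr 1
  rw [PySem.List.pyRange_zero_natCast, PySem.List.foldl_append_singleton_eq_map,
    List.nil_append, List.map_map]
  have henum : PySem.List.enumerate P 0 =
      (List.range P.length).map (fun (i : Nat) => ((i : Int), P.getD i [])) := by
    have := enum_eq P 0
    simpa using this
  rw [henum, List.map_map]
  apply List.map_congr_left
  intro i hi
  simp only [Function.comp, PySem.List.pyGetD_natCast]

-- ===== VERDICT (by name: the statement is the Claim_ definition above) =====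
theorem zadanie_spec : Claim_equal_zadanie := by
  intro P B _ _
  unfold Spec_zadanie zadanie zadanie_alt
  rw [← newTab_eq]
  have h := loopA_eq_loopB (newTab P) (newTab P).length 0 2 0 []
    (fun _ _ _ => none) (by intro i k os v hv; cases hv) (by omega) (by omega) (by omega)
  simpa using h
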